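-- pv_equiv track=rewrite | github.com/chjcode/algorithm_study | programmers/부족한 금액 계산하기.py | solution
-- ===== SOURCE A (Python) =====
-- def solution(price, money, count):
--
--     while count:
--         money -= price * count
--         count -= 1
--     if money > 0:
--         return 0
--     else:
--         return abs(money)
-- ===== SOURCE B (Python) =====
-- def solution(price, money, count):
--     return max(0, price * count * (count + 1) // 2 - money)
-- ===== Notes on version B (the rewrite author's own statement) =====
-- stated objective: faster
-- what changed: Replaces the O(count) while-loop that subtracts price*count step by step with the closed-form Gauss sum price*count*(count+1)//2 and a single max(0, total-money).
import Mathlib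
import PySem

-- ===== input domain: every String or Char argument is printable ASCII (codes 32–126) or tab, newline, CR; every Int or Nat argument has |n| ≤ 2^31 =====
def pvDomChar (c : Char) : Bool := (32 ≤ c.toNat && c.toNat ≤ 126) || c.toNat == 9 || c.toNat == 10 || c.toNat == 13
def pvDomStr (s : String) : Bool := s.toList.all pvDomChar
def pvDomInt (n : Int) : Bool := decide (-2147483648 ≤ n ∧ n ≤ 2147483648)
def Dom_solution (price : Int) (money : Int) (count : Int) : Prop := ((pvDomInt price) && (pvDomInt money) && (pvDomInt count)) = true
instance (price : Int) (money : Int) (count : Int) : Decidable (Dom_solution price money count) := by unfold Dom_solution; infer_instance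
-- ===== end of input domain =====

-- B replaces A's O(count) subtraction loop with the closed-form Gauss sum; faster (asymptotic).
-- Equivalence is on Pre_ (0 ≤ count); for negative count A's while-loop never terminates.

-- ===== PORT A =====
-- A's while-loop: on each step subtract price*count and decrement count; the Nat
-- fuel is exactly the current value of count (valid on Pre_: 0 ≤ count).
def solutionLoop (price : Int) : Int → Nat → Int
  | money, 0 => money
  | money, Nat.succ k => solutionLoop price (money - price * ((k : Int) + 1)) k

def solution (price : Int) (money : Int) (count : Int) : Int :=
  let m := solutionLoop price money count.toNat
  if m > 0 then 0 else |m|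

-- ===== PORT B =====
def solution_alt (price : Int) (money : Int) (count : Int) : Int :=
  max 0 (PySem.Int.floordiv (price * count * (count + 1)) 2 - money)

-- ===== PRECONDITION & SPEC =====
-- Pre_ excludes count < 0, on which A's while-loop never terminates (count decreases past 0 forever).
def Pre_solution (price : Int) (money : Int) (count : Int) : Prop := 0 ≤ count
instance (price : Int) (money : Int) (count : Int) : Decidable (Pre_solution price money count) := by unfold Pre_solution; infer_instance
def pvWitness_solution : Int × Int × Int := (3, 20, 4)

def Spec_solution (price : Int) (money : Int) (count : Int) (out : Int) : Prop := out = solution_alt price money count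
instance (price : Int) (money : Int) (count : Int) (out : Int) : Decidable (Spec_solution price money count out) := by unfold Spec_solution; infer_instance

-- ===== CLAIM (what is proved, stated in full; the proofs are below) =====
def Claim_equal_solution : Prop := ∀ (price : Int) (money : Int) (count : Int), Dom_solution price money count → Pre_solution price money count → Spec_solution price money count (solution price money count)

-- ===== LEMMAS AND PROOFS =====

def pvGauss : Nat → Int
  | 0 => 0
  | Nat.succ k => pvGauss k + ((k : Int) + 1)

theorem solutionLoop_eq (price : Int) (money : Int) (n : Nat) :
    solutionLoop price money n = money - price * pvGauss n := by
  induction n generalizing money with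
  | zero => simp [solutionLoop, pvGauss]
  | succ k ih => simp [solutionLoop, pvGauss, ih]; ring

theorem two_mul_pvGauss (n : Nat) : 2 * pvGauss n = (n : Int) * ((n : Int) + 1) := by
  induction n with
  | zero => simp [pvGauss]
  | succ k ih => simp [pvGauss]; push_cast; linarith

theorem floordiv_gauss (price : Int) (n : Nat) :
    PySem.Int.floordiv (price * (n : Int) * ((n : Int) + 1)) 2 = price * pvGauss n := by
  have h : price * (n : Int) * ((n : Int) + 1) = 2 * (price * pvGauss n) := by
    have := two_mul_pvGauss n; linear_combination (-price) * this
  rw [h]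
  simp [PySem.Int.floordiv, Int.mul_fdiv_cancel_left _ (by norm_num : (2:Int) ≠ 0)]

-- ===== VERDICT (by name: the statement is the Claim_ definition above) =====
theorem solution_spec : Claim_equal_solution := by
  intro price money count _ hpre
  unfold Spec_solution solution solution_alt
  have hc : (count.toNat : Int) = count := Int.toNat_of_nonneg hpre
  rw [solutionLoop_eq]
  rw [show price * count * (count + 1) = price * (count.toNat : Int) * ((count.toNat : Int) + 1) by rw [hc]]
  rw [floordiv_gauss]
  set g := price * pvGauss count.toNat with hg
  by_cases h : money - g > 0
  · rw [if_pos h]; omega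
  · rw [if_neg h]
    rw [abs_of_nonpos (by omega)]
    omega
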